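-- pv_equiv track=rewrite | github.com/Sosohy/algorithm_study | 프로그래머스/1/135808. 과일 장수/과일 장수.py | solution
-- ===== SOURCE A (Python) =====
-- def solution(k, m, score):
--     answer = 0
--
--     score.sort(reverse = True)
--     idx = m-1
--
--     while(idx < len(score)):
--         sc = score[idx]
--         answer += (sc * m)
--
--         idx += m
--
--     return answer
-- ===== SOURCE B (Python) =====
-- def solution(k, m, score):
--     # Frequency-counting algorithm: build a histogram of scores, walk the distinct
--     # values in descending order, and for each value-block compute arithmetically how
--     # many box-minimum positions (indices == m-1 mod m in the descending order) it
--     # covers: the block occupying positions [pos, pos+c) contributes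
--     # v * m * ((pos+c)//m - pos//m).  No per-element indexing into a fully sorted list.
--     counts = {}
--     for v in score:
--         counts[v] = counts.get(v, 0) + 1
--     answer = 0
--     pos = 0
--     for v in sorted(counts, reverse=True):
--         c = counts[v]
--         answer += v * m * ((pos + c) // m - pos // m)
--         pos += c
--     return answer
-- ===== Notes on version B (the rewrite author's own statement) =====
-- stated objective: alternative
-- what changed: Replaces the full descending sort plus per-element index-stepping loop with a frequency histogram: count each score once into a dict, sort only the distinct values descending, and compute each value-block's contribution arithmetically as v*m*((pos+c)//m - pos//m); equivalence is about the return value only - A sorts its argument in place, B does not.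
import Mathlib
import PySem

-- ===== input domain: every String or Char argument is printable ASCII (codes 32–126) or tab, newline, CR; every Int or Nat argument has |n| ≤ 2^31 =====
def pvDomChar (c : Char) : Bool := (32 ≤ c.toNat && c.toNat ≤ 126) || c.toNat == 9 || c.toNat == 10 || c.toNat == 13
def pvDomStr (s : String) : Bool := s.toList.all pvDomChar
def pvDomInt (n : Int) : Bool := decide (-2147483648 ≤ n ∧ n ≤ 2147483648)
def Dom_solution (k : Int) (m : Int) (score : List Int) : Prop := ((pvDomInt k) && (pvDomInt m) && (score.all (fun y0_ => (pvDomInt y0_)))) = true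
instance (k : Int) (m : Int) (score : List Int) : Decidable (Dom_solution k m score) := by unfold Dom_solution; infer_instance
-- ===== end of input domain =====

-- B replaces A's full descending sort + index-stepping loop by a frequency histogram over
-- the scores: it walks only the DISTINCT values in descending order and computes each
-- value-block's contribution arithmetically (return value only: Python A sorts its
-- argument in place, B does not).


-- ===== PORT A =====
-- the while-loop of A; fuel makes it total (under Pre_ the fuel is never exhausted)
def solutionLoop (fuel : Nat) (s : List Int) (m : Int) (idx : Int) (answer : Int) : Int :=
  match fuel with
  | 0 => answer
  | fuel + 1 =>
    if idx < PySem.List.len s then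
      match PySem.List.pyGet? s idx with
      | some sc => solutionLoop fuel s m (idx + m) (answer + sc * m)
      | none => answer   -- IndexError (never reached under Pre_solution)
    else answer

def solution (k : Int) (m : Int) (score : List Int) : Int :=
  let s := PySem.List.sorted score (fun x => x) true   -- score.sort(reverse=True)
  solutionLoop (s.length + 1) s m (m - 1) 0

-- ===== PORT B =====
def solution_alt (k : Int) (m : Int) (score : List Int) : Int :=
  -- counts[v] = counts.get(v, 0) + 1 over score
  let counts := score.foldl (fun d v => PySem.Dict.insert d v (PySem.Dict.getD d v 0 + 1)) PySem.Dict.empty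
  -- for v in sorted(counts, reverse=True): answer += v*m*((pos+c)//m - pos//m); pos += c
  let res := (PySem.List.sorted (PySem.Dict.keys counts) (fun x => x) true).foldl
    (fun (s : Int × Int) v =>
      let c := PySem.Dict.getD counts v 0
      (s.1 + v * m * (PySem.Int.floordiv (s.2 + c) m - PySem.Int.floordiv s.2 m), s.2 + c))
    (0, 0)
  res.1

-- ===== PRECONDITION & SPEC =====
-- Pre_: m ≥ 1.  For m ≤ 0 the Python A raises IndexError or loops forever (idx never
-- advances past len(score) and negative indices eventually fall off the front).
def Pre_solution (k : Int) (m : Int) (score : List Int) : Prop := 1 ≤ m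
instance (k : Int) (m : Int) (score : List Int) : Decidable (Pre_solution k m score) := by unfold Pre_solution; infer_instance
def pvWitness_solution : Int × Int × List Int := (4, 3, [4, 1, 3, 2, 4, 1, 2, 4, 3, 3])
def Spec_solution (k : Int) (m : Int) (score : List Int) (out : Int) : Prop := out = solution_alt k m score
instance (k : Int) (m : Int) (score : List Int) (out : Int) : Decidable (Spec_solution k m score out) := by unfold Spec_solution; infer_instance

-- ===== CLAIM (what is proved, stated in full; the proofs are below) =====
def Claim_equal_solution : Prop := ∀ (k : Int) (m : Int) (score : List Int), Dom_solution k m score → Pre_solution k m score → Spec_solution k m score (solution k m score)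

-- ===== LEMMAS AND PROOFS =====

-- the values A's loop visits: s[i], s[i+mm], s[i+2mm], …
def picks (fuel : Nat) (s : List Int) (mm : Nat) (i : Nat) : List Int :=
  match fuel with
  | 0 => []
  | fuel + 1 =>
    if h : i < s.length then s[i] :: picks fuel s mm (i + mm) else []

theorem solutionLoop_eq_picks (fuel : Nat) (s : List Int) (m idx answer : Int)
    (hm : 1 ≤ m) (hidx : 0 ≤ idx) :
    solutionLoop fuel s m idx answer = answer + m * (picks fuel s m.toNat idx.toNat).sum := by
  induction fuel generalizing idx answer with
  | zero => simp [solutionLoop, picks]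
  | succ fuel ih =>
    simp only [solutionLoop, picks, PySem.List.len_eq]
    by_cases h : idx < (s.length : Int)
    · have hlt : idx.toNat < s.length := by omega
      rw [if_pos h, PySem.List.pyGet?_eq_some_getElem s hidx h]
      show solutionLoop fuel s m (idx + m) (answer + s[idx.toNat] * m) = _
      rw [dif_pos hlt]
      rw [ih (idx + m) _ (by omega)]
      have : (idx + m).toNat = idx.toNat + m.toNat := by omega
      rw [this]
      simp [List.sum_cons]
      ring
    · rw [if_neg h, dif_neg (by omega)]
      simp

theorem picks_eq_map_range (fuel : Nat) (s : List Int) (mm : Nat) (hmm : 1 ≤ mm) :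
    ∀ i : Nat, s.length ≤ i + fuel →
    picks fuel s mm i
      = (List.range ((s.length - i + mm - 1) / mm)).map (fun j => s.getD (i + j * mm) 0) := by
  induction fuel with
  | zero =>
    intro i hi
    rw [picks, show s.length - i + mm - 1 = mm - 1 by omega,
      Nat.div_eq_of_lt (show mm - 1 < mm by omega)]
    simp
  | succ fuel ih =>
    intro i hi
    by_cases h : i < s.length
    · have hc : (s.length - i + mm - 1) / mm = (s.length - (i + mm) + mm - 1) / mm + 1 := by
        have h1 : s.length - i + mm - 1 = (s.length - i - 1) + mm := by omega
        have h2 : s.length - (i + mm) + mm - 1 = s.length - i - 1 ∨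
            (s.length - i < mm ∧ s.length - (i + mm) + mm - 1 = mm - 1) := by omega
        rcases h2 with h2 | ⟨h2a, h2b⟩
        · rw [h1, h2, Nat.add_div_right _ (by omega)]
        · rw [h1, h2b, Nat.add_div_right _ (by omega),
            Nat.div_eq_of_lt (by omega), Nat.div_eq_of_lt (by omega)]
      rw [picks, dif_pos h, hc, List.range_succ_eq_map, List.map_cons,
        ih (i + mm) (by omega)]
      congr 1
      · have h0 : i + 0 * mm = i := by omega
        rw [h0, List.getD_eq_getElem s 0 h]
      · simp only [List.map_map]
        apply List.map_congr_left
        intro j _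
        simp only [Function.comp_apply, Nat.succ_eq_add_one]
        congr 1
        ring
    · rw [picks, dif_neg h, show s.length - i + mm - 1 = mm - 1 by omega,
        Nat.div_eq_of_lt (show mm - 1 < mm by omega)]
      simp

-- descending sort is the reverse of the ascending sort (Int values, identity key)
theorem sorted_rev_eq_reverse_sorted (xs : List Int) :
    PySem.List.sorted xs (fun x => x) true = (PySem.List.sorted xs (fun x => x)).reverse := by
  have h := PySem.List.eq_of_perm_of_pairwise_le_of_injective
    (l₁ := (PySem.List.sorted xs (fun x => x) true).reverse)
    (l₂ := PySem.List.sorted xs (fun x => x))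
    (fun x => x) (fun _ _ h => h)
    ((List.reverse_perm _).trans
      ((PySem.List.sorted_perm xs (fun x => x) true).trans
        (PySem.List.sorted_perm xs (fun x => x) false).symm))
    (by
      rw [List.pairwise_reverse]
      exact PySem.List.sorted_pairwise_rev xs (fun x => x))
    (PySem.List.sorted_pairwise xs (fun x => x))
  calc PySem.List.sorted xs (fun x => x) true
      = ((PySem.List.sorted xs (fun x => x) true).reverse).reverse := by rw [List.reverse_reverse]
    _ = (PySem.List.sorted xs (fun x => x)).reverse := by rw [h]

-- the sum of the elements of l (placed at positions pos, pos+1, …) whose position i has (i+1) % mm = 0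
def wsum (mm : Nat) : Nat → List Int → Int
  | _, [] => 0
  | pos, x :: t => (if (pos + 1) % mm = 0 then x else 0) + wsum mm (pos + 1) t

theorem wsum_append (mm : Nat) (a b : List Int) :
    ∀ pos, wsum mm pos (a ++ b) = wsum mm pos a + wsum mm (pos + a.length) b := by
  induction a with
  | nil => intro pos; simp [wsum]
  | cons x t ih =>
    intro pos
    simp only [List.cons_append, wsum, ih (pos + 1), List.length_cons]
    rw [show pos + 1 + t.length = pos + (t.length + 1) by omega]
    ring

theorem wsum_replicate (mm : Nat) (v : Int) :
    ∀ (c pos : Nat), wsum mm pos (List.replicate c v)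
      = v * ((((pos + c) / mm : Nat) : Int) - ((pos / mm : Nat) : Int)) := by
  intro c
  induction c with
  | zero => intro pos; simp [wsum]
  | succ c ih =>
    intro pos
    rw [List.replicate_succ', wsum_append, ih pos]
    simp only [List.length_replicate, wsum]
    have hsucc : (pos + c + 1) / mm = (pos + c) / mm + if mm ∣ (pos + c + 1) then 1 else 0 :=
      Nat.succ_div
    have hdvd : (pos + c + 1) % mm = 0 ↔ mm ∣ (pos + c + 1) := Nat.dvd_iff_mod_eq_zero.symm
    rw [show pos + (c + 1) = pos + c + 1 by omega, hsucc]
    by_cases h : mm ∣ (pos + c + 1)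
    · rw [if_pos (hdvd.mpr h), if_pos h]
      push_cast
      ring
    · rw [if_neg (fun hh => h (hdvd.mp hh)), if_neg h]
      push_cast
      ring

-- B's loop over the distinct values, with cnt an abstract count function
theorem foldB (m : Int) (hm : 1 ≤ m) (cnt : Int → Nat) (D : List Int) :
    ∀ (acc : Int) (pos : Nat),
    (D.foldl (fun (s : Int × Int) v =>
        (s.1 + v * m * (PySem.Int.floordiv (s.2 + ((cnt v : Nat) : Int)) m - PySem.Int.floordiv s.2 m),
         s.2 + ((cnt v : Nat) : Int)))
      (acc, ((pos : Nat) : Int))).1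
    = acc + m * wsum m.toNat pos (D.flatMap (fun v => List.replicate (cnt v) v)) := by
  induction D with
  | nil => intro acc pos; simp [wsum]
  | cons v D ih =>
    intro acc pos
    have hmcast : m = ((m.toNat : Nat) : Int) := by omega
    simp only [List.foldl_cons, List.flatMap_cons]
    rw [wsum_append, wsum_replicate m.toNat v, List.length_replicate]
    have hc1 : ((pos : Nat) : Int) + ((cnt v : Nat) : Int) = (((pos + cnt v : Nat) : Nat) : Int) := by push_cast; ring
    rw [hc1, ih]
    have hfd1 : PySem.Int.floordiv (((pos + cnt v : Nat) : Int)) m = (((pos + cnt v) / m.toNat : Nat) : Int) := by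
      rw [hmcast]; exact PySem.Int.floordiv_natCast _ _
    have hfd2 : PySem.Int.floordiv (((pos : Nat) : Int)) m = ((pos / m.toNat : Nat) : Int) := by
      rw [hmcast]; exact PySem.Int.floordiv_natCast _ _
    rw [hfd1, hfd2]
    ring

-- wsum as an indicator sum over positions
theorem wsum_eq_sum_range (mm : Nat) (l : List Int) :
    ∀ pos, wsum mm pos l
      = ∑ i ∈ Finset.range l.length, if (pos + i + 1) % mm = 0 then l.getD i 0 else 0 := by
  induction l with
  | nil => intro pos; simp [wsum]
  | cons x t ih =>
    intro pos
    rw [List.length_cons, Finset.sum_range_succ', wsum, ih (pos + 1)]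
    simp only [List.getD_cons_succ, List.getD_cons_zero]
    have : ∀ i, pos + 1 + i + 1 = pos + (i + 1) + 1 := by omega
    rw [Finset.sum_congr rfl (fun i _ => by rw [this i])]
    ring

-- A's picked positions mm-1, 2mm-1, … are exactly the positions with (i+1) % mm = 0
theorem map_range_eq_wsum (s : List Int) (mm : Nat) (hmm : 1 ≤ mm) :
    ((List.range (s.length / mm)).map (fun j => s.getD (mm - 1 + j * mm) 0)).sum
      = wsum mm 0 s := by
  rw [wsum_eq_sum_range]
  have hfil : (∑ i ∈ Finset.range s.length, if (0 + i + 1) % mm = 0 then s.getD i 0 else 0)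
      = ∑ i ∈ (Finset.range s.length).filter (fun i => (0 + i + 1) % mm = 0), s.getD i 0 :=
    (Finset.sum_filter _ _).symm
  rw [hfil]
  have hlist : ((List.range (s.length / mm)).map (fun j => s.getD (mm - 1 + j * mm) 0)).sum
      = ∑ j ∈ Finset.range (s.length / mm), s.getD (mm - 1 + j * mm) 0 := rfl
  rw [hlist]
  have hdec : ∀ i, i < s.length → (0 + i + 1) % mm = 0 →
      ∃ q', i = mm - 1 + q' * mm ∧ i / mm = q' ∧ q' < s.length / mm := by
    intro i hilt hmod
    obtain ⟨q, hq⟩ := Nat.dvd_iff_mod_eq_zero.mpr hmod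
    have hq0 : q ≠ 0 := by rintro rfl; simp at hq
    obtain ⟨q', rfl⟩ : ∃ q', q = q' + 1 := ⟨q - 1, by omega⟩
    have hr : mm * (q' + 1) = q' * mm + mm := by ring
    have hie : i = mm - 1 + q' * mm := by omega
    have hidiv : i / mm = q' := by
      rw [hie, Nat.add_mul_div_right _ _ (by omega : 0 < mm), Nat.div_eq_of_lt (by omega)]
      omega
    refine ⟨q', hie, hidiv, ?_⟩
    have hle : q' + 1 ≤ s.length / mm := by
      rw [Nat.le_div_iff_mul_le (by omega)]
      have h2 : (q' + 1) * mm = mm * (q' + 1) := by ring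
      omega
    omega
  apply Finset.sum_nbij' (i := fun j => mm - 1 + j * mm) (j := fun i => i / mm)
  · intro j hj
    rw [Finset.mem_range] at hj
    have hmul : (j + 1) * mm ≤ s.length := by
      rw [← Nat.le_div_iff_mul_le (by omega)]; omega
    have hexp : (j + 1) * mm = j * mm + mm := by ring
    rw [Finset.mem_filter, Finset.mem_range]
    refine ⟨by omega, ?_⟩
    have h1 : 0 + (mm - 1 + j * mm) + 1 = (j + 1) * mm := by omega
    rw [h1]
    simp [Nat.mul_mod_left]
  · intro i hi
    rw [Finset.mem_filter, Finset.mem_range] at hi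
    obtain ⟨q', _, hidiv, hqlt⟩ := hdec i hi.1 hi.2
    rw [Finset.mem_range, hidiv]; exact hqlt
  · intro j hj
    rw [Nat.add_mul_div_right _ _ (by omega : 0 < mm), Nat.div_eq_of_lt (by omega)]
    omega
  · intro i hi
    rw [Finset.mem_filter, Finset.mem_range] at hi
    obtain ⟨q', hie, hidiv, _⟩ := hdec i hi.1 hi.2
    rw [hidiv]; omega
  · intro j hj
    rfl

-- counting in a flatMap of replicate-blocks over a nodup list
theorem count_flatMap_replicate (cnt : Int → Nat) (w : Int) :
    ∀ (D : List Int), D.Nodup →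
    (D.flatMap (fun v => List.replicate (cnt v) v)).count w = if w ∈ D then cnt w else 0 := by
  intro D
  induction D with
  | nil => intro _; simp
  | cons v D ih =>
    intro hnd
    rw [List.nodup_cons] at hnd
    rw [List.flatMap_cons, List.count_append, ih hnd.2, List.count_replicate]
    by_cases hw : w = v
    · subst hw
      simp [hnd.1]
    · simp [hw, Ne.symm hw]

-- a pairwise-descending key list gives a pairwise-descending flatMap of constant blocks
theorem pairwise_flatMap_replicate (cnt : Int → Nat) (D : List Int)
    (h : D.Pairwise (fun a b => b ≤ a)) :
    (D.flatMap (fun v => List.replicate (cnt v) v)).Pairwise (fun a b => b ≤ a) := by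
  induction D with
  | nil => simp
  | cons v D ih =>
    rw [List.pairwise_cons] at h
    rw [List.flatMap_cons, List.pairwise_append]
    refine ⟨List.pairwise_replicate.mpr (by simp), ih h.2, ?_⟩
    intro a ha b hb
    rw [List.eq_of_mem_replicate ha]
    rw [List.mem_flatMap] at hb
    obtain ⟨u, hu, hbu⟩ := hb
    rw [List.eq_of_mem_replicate hbu]
    exact h.1 u hu

-- the descending-sorted score list is the flatMap of its distinct values (descending) into count-blocks
theorem desc_eq_flatMap (score : List Int) :
    PySem.List.sorted score (fun x => x) true
      = (PySem.List.sorted (PySem.Set.ofList score) (fun x => x) true).flatMap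
          (fun v => List.replicate (score.count v) v) := by
  set D := PySem.List.sorted (PySem.Set.ofList score) (fun x => x) true with hD
  have hpermD : D.Perm (PySem.Set.ofList score) := PySem.List.sorted_perm _ _ _
  have hnd : D.Nodup := hpermD.symm.nodup (PySem.Set.nodup_ofList score)
  have hmemD : ∀ w, w ∈ D ↔ w ∈ score := by
    intro w
    rw [hpermD.mem_iff, PySem.Set.mem_ofList]
  have hperm : (D.flatMap (fun v => List.replicate (score.count v) v)).Perm score := by
    rw [List.perm_iff_count]
    intro w
    rw [count_flatMap_replicate _ _ _ hnd]
    by_cases hw : w ∈ D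
    · simp [hw]
    · rw [if_neg hw, Eq.comm, List.count_eq_zero]
      exact fun hws => hw ((hmemD w).mpr hws)
  have hpw : (D.flatMap (fun v => List.replicate (score.count v) v)).Pairwise (fun a b => b ≤ a) :=
    pairwise_flatMap_replicate _ _ (PySem.List.sorted_pairwise_rev _ (fun x => x))
  have h := PySem.List.eq_of_perm_of_pairwise_le_of_injective
    (l₁ := (D.flatMap (fun v => List.replicate (score.count v) v)).reverse)
    (l₂ := PySem.List.sorted score (fun x => x))
    (fun x => x) (fun _ _ h => h)
    ((List.reverse_perm _).trans (hperm.trans (PySem.List.sorted_perm score (fun x => x) false).symm))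
    (by rw [List.pairwise_reverse]; exact hpw)
    (PySem.List.sorted_pairwise score (fun x => x))
  rw [sorted_rev_eq_reverse_sorted score, ← h, List.reverse_reverse]

theorem solution_spec' (k m : Int) (score : List Int) (hm : 1 ≤ m) :
    solution k m score = solution_alt k m score := by
  simp only [solution, solution_alt]
  -- A side: loop = m * (map-range sum) = m * wsum over the descending list
  rw [solutionLoop_eq_picks _ _ _ _ _ hm (by omega)]
  rw [picks_eq_map_range _ _ _ (by omega) _ (by omega)]
  have hm1 : (m - 1).toNat = m.toNat - 1 := by omega
  set s := PySem.List.sorted score (fun x => x) true with hs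
  have hcount : (s.length - (m - 1).toNat + m.toNat - 1) / m.toNat = s.length / m.toNat := by
    rw [hm1]
    rcases Nat.lt_or_ge s.length (m.toNat - 1) with h | h
    · rw [Nat.div_eq_of_lt (by omega), Nat.div_eq_of_lt (by omega)]
    · congr 1; omega
  rw [hcount, hm1, map_range_eq_wsum s m.toNat (by omega)]
  -- B side
  have hcounter : score.foldl (fun d v => PySem.Dict.insert d v (PySem.Dict.getD d v 0 + 1)) PySem.Dict.empty
      = PySem.Dict.counter score := PySem.Dict.foldl_insert_getD_add_one_eq_counter score
  rw [hcounter, PySem.Dict.keys_counter]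
  have hfun : (fun (st : Int × Int) v =>
        (st.1 + v * m * (PySem.Int.floordiv (st.2 + PySem.Dict.getD (PySem.Dict.counter score) v 0) m
            - PySem.Int.floordiv st.2 m),
         st.2 + PySem.Dict.getD (PySem.Dict.counter score) v 0))
      = (fun (st : Int × Int) v =>
        (st.1 + v * m * (PySem.Int.floordiv (st.2 + ((score.count v : Nat) : Int)) m
            - PySem.Int.floordiv st.2 m),
         st.2 + ((score.count v : Nat) : Int))) := by
    funext st v
    rw [PySem.Dict.getD_counter]
  simp only [hfun]
  have h0 : ((0 : Int), (0 : Int)) = ((0 : Int), ((0 : Nat) : Int)) := by norm_num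
  rw [h0, foldB m hm (fun v => score.count v) _ 0 0]
  rw [← desc_eq_flatMap score, ← hs]

-- ===== VERDICT (by name: the statement is the Claim_ definition above) =====
theorem solution_spec : Claim_equal_solution := by
  intro k m score _ hpre
  exact solution_spec' k m score hpre
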